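-- pv_equiv track=rewrite | github.com/steinitzchess2311-web/Catachess | backend/core/chess_basic/pgn/common/serialize.py | serialize_tags
-- ===== SOURCE A (Python) =====
-- def serialize_tags(tags: dict[str, str]) -> str:
--     """
--     序列化标签为 PGN 格式
--     Serialize tags to PGN format
--
--     Args:
--         tags: Dictionary of tags
--
--     Returns:
--         PGN tag section string
--     """
--     lines = []
--
--     # 七标签名册按顺序 Seven Tag Roster in order
--     roster_order = ["Event", "Site", "Date", "Round", "White", "Black", "Result"]
--     for key in roster_order:
--         if key in tags:
--             lines.append(f'[{key} "{tags[key]}"]')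
--
--     # 其他标签 Other tags
--     for key, value in sorted(tags.items()):
--         if key not in roster_order:
--             lines.append(f'[{key} "{value}"]')
--
--     return "\n".join(lines)
-- ===== SOURCE B (Python) =====
-- def serialize_tags(tags: dict[str, str]) -> str:
--     """Serialize tags to PGN format: Seven Tag Roster in fixed order, then the rest alphabetically."""
--     roster = ["Event", "Site", "Date", "Round", "White", "Black", "Result"]
--     rank = {k: i for i, k in enumerate(roster)}
--     ordered = sorted(tags.items(), key=lambda kv: (rank.get(kv[0], len(roster)), kv[0]))
--     return "\n".join(f'[{k} "{v}"]' for k, v in ordered)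
-- ===== Notes on version B (the rewrite author's own statement) =====
-- stated objective: simpler
-- what changed: A's two emission passes (fixed roster scan with per-key dict lookups, then a separate sorted scan that skips roster keys) are collapsed into one sort of all items by the composite key (roster rank, key name) followed by a single formatting pass.
import Mathlib
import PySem

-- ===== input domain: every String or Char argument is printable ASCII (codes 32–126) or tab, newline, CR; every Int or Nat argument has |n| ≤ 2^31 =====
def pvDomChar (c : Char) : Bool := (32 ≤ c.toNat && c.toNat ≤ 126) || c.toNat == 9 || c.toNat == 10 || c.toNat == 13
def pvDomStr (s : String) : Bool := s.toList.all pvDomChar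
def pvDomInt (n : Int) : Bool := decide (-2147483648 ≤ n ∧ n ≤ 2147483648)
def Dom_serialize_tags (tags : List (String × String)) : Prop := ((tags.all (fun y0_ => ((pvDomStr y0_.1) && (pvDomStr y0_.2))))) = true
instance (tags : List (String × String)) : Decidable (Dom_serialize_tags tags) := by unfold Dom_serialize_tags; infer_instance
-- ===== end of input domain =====

-- B replaces A's two emission passes (a fixed roster scan plus a separate sorted scan over the
-- remainder) by ONE composite-key sort — rank in the roster first, key name second — followed by a
-- single formatting pass (objective: simpler, same cost).

-- ===== PORT A =====
-- Seven Tag Roster (module constant inside A)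
def pvRoster : List String := ["Event", "Site", "Date", "Round", "White", "Black", "Result"]
-- f'[{key} "{value}"]'
def pvFmt (k v : String) : String := PySem.Str.join "" ["[", k, " \"", v, "\"]"]

def serialize_tags (tags : List (String × String)) : String :=
  -- for key in roster_order: if key in tags: lines.append(f'[{key} "{tags[key]}"]')
  let lines : List String := pvRoster.foldl (fun ls key =>
      match tags.find? (fun kv => kv.1 == key) with
      | some kv => ls ++ [pvFmt key kv.2]
      | none => ls) []
  -- for key, value in sorted(tags.items()): if key not in roster_order: lines.append(...)
  let lines := (PySem.List.sorted2 tags Prod.fst Prod.snd false).foldl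
      (fun ls kv => if !pvRoster.contains kv.1 then ls ++ [pvFmt kv.1 kv.2] else ls) lines
  PySem.Str.join "\n" lines

-- ===== PORT B =====
def serialize_tags_alt (tags : List (String × String)) : String :=
  let roster : List String := ["Event", "Site", "Date", "Round", "White", "Black", "Result"]
  -- rank = {k: i for i, k in enumerate(roster)}
  let rank : PySem.Dict String Int :=
    (PySem.List.enumerate roster).foldl (fun d ik => d.insert ik.2 ik.1) PySem.Dict.empty
  -- ordered = sorted(tags.items(), key=lambda kv: (rank.get(kv[0], len(roster)), kv[0]))
  let ordered := PySem.List.sorted2 tags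
      (fun kv => rank.getD kv.1 (roster.length : Int)) (fun kv => kv.1) false
  PySem.Str.join "\n" (ordered.map (fun kv => pvFmt kv.1 kv.2))

-- ===== PRECONDITION & SPEC =====
-- Pre_ excludes association lists with duplicate keys: they do not encode a Python dict (dict
-- construction silently collapses duplicates), so A's behaviour on them is not defined by A.
def Pre_serialize_tags (tags : List (String × String)) : Prop := (tags.map Prod.fst).Nodup
instance (tags : List (String × String)) : Decidable (Pre_serialize_tags tags) := by
  unfold Pre_serialize_tags; infer_instance

def pvWitness_serialize_tags : (List (String × String)) :=
  [("Event", "Casual"), ("Annotator", "me"), ("Result", "1-0")]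

def Spec_serialize_tags (tags : List (String × String)) (out : String) : Prop := out = serialize_tags_alt tags
instance (tags : List (String × String)) (out : String) : Decidable (Spec_serialize_tags tags out) := by unfold Spec_serialize_tags; infer_instance

-- ===== CLAIM (what is proved, stated in full; the proofs are below) =====
def Claim_equal_serialize_tags : Prop := ∀ (tags : List (String × String)), Dom_serialize_tags tags → Pre_serialize_tags tags → Spec_serialize_tags tags (serialize_tags tags)

-- ===== LEMMAS AND PROOFS =====

-- proof-side abbreviations
def pvFmt2 (kv : String × String) : String := pvFmt kv.1 kv.2
def pvKeyA (kv : String × String) : String ×ₗ String := toLex (kv.1, kv.2)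
def pvRnk (k : String) : Int :=
  if k = "Event" then 0 else if k = "Site" then 1 else if k = "Date" then 2
  else if k = "Round" then 3 else if k = "White" then 4 else if k = "Black" then 5
  else if k = "Result" then 6 else 7
def pvKeyB (kv : String × String) : Int ×ₗ String := toLex (pvRnk kv.1, kv.1)
def pvR (tags : List (String × String)) : List (String × String) :=
  pvRoster.filterMap (fun key => tags.find? (fun kv => kv.1 == key))
def pvO (tags : List (String × String)) : List (String × String) :=
  (PySem.List.sorted tags pvKeyA false).filter (fun kv => !pvRoster.contains kv.1)

-- Python's tuple-key sort is the sort by the lexicographic key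
theorem pv_sorted2_eq_sorted {α κ₁ κ₂ : Type} [LinearOrder κ₁] [LinearOrder κ₂]
    (xs : List α) (k1 : α → κ₁) (k2 : α → κ₂) :
    PySem.List.sorted2 xs k1 k2 false
      = PySem.List.sorted xs (fun x => toLex (k1 x, k2 x)) false := by
  have hb : (fun (a c : α) => decide (k1 a < k1 c) || (!decide (k1 c < k1 a) && decide (k2 a < k2 c)))
      = (fun (a c : α) => decide (toLex (k1 a, k2 a) < toLex (k1 c, k2 c))) := by
    funext a c
    rcases lt_trichotomy (k1 a) (k1 c) with h|h|h
    · simp [Prod.Lex.lt_iff, h]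
    · simp [Prod.Lex.lt_iff, h]
    · simp [Prod.Lex.lt_iff, h, lt_asymm h, ne_of_gt h]
  simp only [PySem.List.sorted2, PySem.List.sorted, Bool.false_eq_true, if_false, hb]

-- B's rank dict lookup, in closed form
theorem pv_rank_eq (k : String) :
    ((PySem.List.enumerate pvRoster).foldl
        (fun d ik => d.insert ik.2 ik.1) PySem.Dict.empty).getD k ((pvRoster.length : Nat) : Int)
      = pvRnk k := by
  by_cases h1 : k = "Event"; · subst h1; decide
  by_cases h2 : k = "Site"; · subst h2; decide
  by_cases h3 : k = "Date"; · subst h3; decide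
  by_cases h4 : k = "Round"; · subst h4; decide
  by_cases h5 : k = "White"; · subst h5; decide
  by_cases h6 : k = "Black"; · subst h6; decide
  by_cases h7 : k = "Result"; · subst h7; decide
  have hd : (PySem.List.enumerate pvRoster).foldl
        (fun d ik => d.insert ik.2 ik.1) PySem.Dict.empty
      = PySem.Dict.mk [("Event", (0:Int)), ("Site", 1), ("Date", 2), ("Round", 3),
          ("White", 4), ("Black", 5), ("Result", 6)] := by decide
  rw [hd]
  have hnil : ((({ items := ([] : List (String × Int)) } : PySem.Dict String Int).get? k).getD
      ((pvRoster.length : Nat) : Int)) = 7 := rfl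
  simp [PySem.Dict.getD, PySem.Dict.get?_mk_cons, pvRnk, hnil,
    h1, h2, h3, h4, h5, h6, h7,
    Ne.symm h1, Ne.symm h2, Ne.symm h3, Ne.symm h4, Ne.symm h5, Ne.symm h6, Ne.symm h7]

theorem pv_rnk_lt_of_mem (k : String) (h : k ∈ pvRoster) : pvRnk k < 7 := by
  simp only [pvRoster, List.mem_cons, List.not_mem_nil, or_false] at h
  rcases h with h|h|h|h|h|h|h <;> subst h <;> decide

theorem pv_rnk_eq_of_not_mem (k : String) (h : k ∉ pvRoster) : pvRnk k = 7 := by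
  simp only [pvRoster, List.mem_cons, List.not_mem_nil, or_false, not_or] at h
  obtain ⟨h1, h2, h3, h4, h5, h6, h7⟩ := h
  simp [pvRnk, h1, h2, h3, h4, h5, h6, h7]

-- with nodup keys, the key determines the element
theorem pv_key_inj {tags : List (String × String)} (h : (tags.map Prod.fst).Nodup)
    {a b : String × String} (ha : a ∈ tags) (hb : b ∈ tags) (hk : a.1 = b.1) : a = b := by
  induction tags with
  | nil => cases ha
  | cons x xs ih =>
    simp only [List.map_cons, List.nodup_cons, List.mem_map] at h
    rcases List.mem_cons.1 ha with rfl | ha' <;> rcases List.mem_cons.1 hb with rfl | hb'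
    · rfl
    · exact absurd ⟨b, hb', hk.symm⟩ h.1
    · exact absurd ⟨a, ha', hk⟩ h.1
    · exact ih h.2 ha' hb'

-- A's roster loop
theorem pv_foldl_roster (tags : List (String × String)) (keys : List String)
    (acc : List String) :
    keys.foldl (fun ls key =>
        match tags.find? (fun kv => kv.1 == key) with
        | some kv => ls ++ [pvFmt key kv.2]
        | none => ls) acc
      = acc ++ (keys.filterMap (fun key => tags.find? (fun kv => kv.1 == key))).map pvFmt2 := by
  induction keys generalizing acc with
  | nil => simp
  | cons key ks ih =>
    simp only [List.foldl_cons, List.filterMap_cons]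
    cases hf : tags.find? (fun kv => kv.1 == key) with
    | none => simpa using ih acc
    | some kv =>
      have hk : kv.1 = key := by simpa using List.find?_some hf
      simp only [ih, List.map_cons, List.append_assoc, List.singleton_append, pvFmt2, hk]

theorem pv_A_eq (tags : List (String × String)) :
    serialize_tags tags = PySem.Str.join "\n" ((pvR tags ++ pvO tags).map pvFmt2) := by
  show PySem.Str.join "\n"
      ((PySem.List.sorted2 tags Prod.fst Prod.snd false).foldl
        (fun ls kv => if !pvRoster.contains kv.1 then ls ++ [pvFmt kv.1 kv.2] else ls)
        (pvRoster.foldl (fun ls key =>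
          match tags.find? (fun kv => kv.1 == key) with
          | some kv => ls ++ [pvFmt key kv.2]
          | none => ls) [])) = _
  rw [pv_foldl_roster, pv_sorted2_eq_sorted tags Prod.fst Prod.snd,
      PySem.List.foldl_append_if (fun kv => !pvRoster.contains kv.1)
        (fun kv : String × String => pvFmt kv.1 kv.2)]
  simp only [List.nil_append, pvR, pvO, List.map_append]
  rfl

theorem pv_B_eq (tags : List (String × String)) :
    serialize_tags_alt tags
      = PySem.Str.join "\n" ((PySem.List.sorted tags pvKeyB false).map pvFmt2) := by
  show PySem.Str.join "\n"
      ((PySem.List.sorted2 tags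
          (fun kv => ((PySem.List.enumerate pvRoster).foldl
              (fun d ik => d.insert ik.2 ik.1) PySem.Dict.empty).getD kv.1
              ((pvRoster.length : Nat) : Int))
          (fun kv => kv.1) false).map (fun kv => pvFmt kv.1 kv.2)) = _
  have hkey : (fun (kv : String × String) =>
        ((PySem.List.enumerate pvRoster).foldl
            (fun d ik => d.insert ik.2 ik.1) PySem.Dict.empty).getD kv.1
            ((pvRoster.length : Nat) : Int)) = fun kv => pvRnk kv.1 := by
    funext kv; exact pv_rank_eq kv.1
  rw [hkey, pv_sorted2_eq_sorted tags _ (fun kv => kv.1)]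
  rfl

-- the heart: B's single composite-key sort equals A's roster picks followed by the sorted rest
theorem pv_sortB_eq (tags : List (String × String)) (h : (tags.map Prod.fst).Nodup) :
    PySem.List.sorted tags pvKeyB false = pvR tags ++ pvO tags := by
  have htagsN : tags.Nodup := List.Nodup.of_map Prod.fst h
  -- membership in pvR
  have hmemR : ∀ x, x ∈ pvR tags ↔ x ∈ tags ∧ x.1 ∈ pvRoster := by
    intro x
    constructor
    · intro hx
      obtain ⟨key, hkey, hf⟩ := List.mem_filterMap.1 hx
      have hx1 : x.1 = key := by simpa using List.find?_some hf
      exact ⟨List.mem_of_find?_eq_some hf, hx1 ▸ hkey⟩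
    · rintro ⟨hxt, hxr⟩
      have hs : (tags.find? (fun kv => kv.1 == x.1)).isSome :=
        List.find?_isSome.2 ⟨x, hxt, by simp⟩
      obtain ⟨kv, hkv⟩ := Option.isSome_iff_exists.1 hs
      have hkv1 : kv.1 = x.1 := by simpa using List.find?_some hkv
      have : kv = x := pv_key_inj h (List.mem_of_find?_eq_some hkv) hxt hkv1
      exact List.mem_filterMap.2 ⟨x.1, hxr, this ▸ hkv⟩
  -- pvR is a permutation of the roster-keyed entries
  have hRnodup : (pvR tags).Nodup := by
    have hro : pvRoster.Pairwise (· ≠ ·) := by decide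
    refine List.pairwise_filterMap.2 (hro.imp_of_mem ?_)
    intro k k' _ _ hne b hb b' hb' hbb
    apply hne
    have h1 : b.1 = k := by simpa using List.find?_some hb
    have h2 : b'.1 = k' := by simpa using List.find?_some hb'
    rw [← h1, ← h2, hbb]
  have hRperm : (pvR tags).Perm (tags.filter (fun kv => pvRoster.contains kv.1)) := by
    refine (List.perm_ext_iff_of_nodup hRnodup (htagsN.filter _)).2 ?_
    intro x
    rw [hmemR x, List.mem_filter]
    simp [List.contains_eq_mem]
  -- pvO is a permutation of the rest
  have hOperm : (pvO tags).Perm (tags.filter (fun kv => !pvRoster.contains kv.1)) :=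
    (PySem.List.sorted_perm tags pvKeyA false).filter _
  have hperm : (pvR tags ++ pvO tags).Perm tags :=
    (hRperm.append hOperm).trans (List.filter_append_perm _ tags)
  -- strict pairwise order under pvKeyB
  have hpw : (pvR tags ++ pvO tags).Pairwise (fun a b => pvKeyB a < pvKeyB b) := by
    rw [List.pairwise_append]
    refine ⟨?_, ?_, ?_⟩
    · -- roster picks: strictly increasing rank
      have hro : pvRoster.Pairwise (fun k k' => pvRnk k < pvRnk k') := by decide
      refine List.pairwise_filterMap.2 (hro.imp_of_mem ?_)
      intro k k' _ _ hlt b hb b' hb'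
      have h1 : b.1 = k := by simpa using List.find?_some hb
      have h2 : b'.1 = k' := by simpa using List.find?_some hb'
      exact Prod.Lex.toLex_lt_toLex.2 (Or.inl (by rw [h1, h2]; exact hlt))
    · -- the rest: ranks all 7, keys strictly increasing
      have hle : (pvO tags).Pairwise (fun a b => pvKeyA a ≤ pvKeyA b) :=
        (PySem.List.sorted_pairwise tags pvKeyA).filter _
      have hnodupO : ((pvO tags).map Prod.fst).Nodup := by
        have h1 : ((tags.filter (fun kv => !pvRoster.contains kv.1)).map Prod.fst).Nodup :=
          h.sublist (List.filter_sublist.map Prod.fst)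
        exact ((hOperm.map Prod.fst).nodup_iff).2 h1
      have hne : (pvO tags).Pairwise (fun a b => a.1 ≠ b.1) := by
        have := List.nodup_iff_pairwise_ne.1 hnodupO
        exact (List.pairwise_map.1 this)
      refine (hle.and hne).imp_of_mem ?_
      intro a b ha hb hab
      have hra : pvRnk a.1 = 7 := pv_rnk_eq_of_not_mem a.1 (by
        have := (List.mem_filter.1 ha).2; simpa [List.contains_eq_mem] using this)
      have hrb : pvRnk b.1 = 7 := pv_rnk_eq_of_not_mem b.1 (by
        have := (List.mem_filter.1 hb).2; simpa [List.contains_eq_mem] using this)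
      have h1lt : a.1 < b.1 := by
        rcases Prod.Lex.toLex_le_toLex.1 hab.1 with hlt | ⟨heq, _⟩
        · exact hlt
        · exact absurd heq hab.2
      exact Prod.Lex.toLex_lt_toLex.2 (Or.inr ⟨by rw [hra, hrb], h1lt⟩)
    · -- roster picks come before the rest
      intro a ha b hb
      have hra : pvRnk a.1 < 7 := pv_rnk_lt_of_mem a.1 ((hmemR a).1 ha).2
      have hrb : pvRnk b.1 = 7 := pv_rnk_eq_of_not_mem b.1 (by
        have := (List.mem_filter.1 hb).2; simpa [List.contains_eq_mem] using this)
      exact Prod.Lex.toLex_lt_toLex.2 (Or.inl (by rw [hrb]; exact hra))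
  exact PySem.List.sorted_eq_of_perm_of_pairwise_lt tags _ pvKeyB hperm hpw

-- ===== VERDICT (by name: the statement is the Claim_ definition above) =====
theorem serialize_tags_spec : Claim_equal_serialize_tags := by
  intro tags _ hpre
  unfold Spec_serialize_tags
  rw [pv_A_eq, pv_B_eq, pv_sortB_eq tags hpre]
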